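-- pv_equiv track=rewrite | github.com/minjussi/study-problem-solving | Programmers/09_카카오_기출/중요한단어를스포방지.py | solution
-- ===== SOURCE A (Python) =====
-- def solution(message, spoiler_ranges):
--     # 1. message에서 인덱스를 전부 추출한 문자열 만들기
--     message_index = []
--     start = 0
--     for i in range(len(message)):
--         if message[i] == " ":
--             message_index.append([start, i-1])
--             start = i+1
--         if i == len(message)-1:
--             message_index.append([start, i])
--     # 2. not_important_set - spoiler_ranges에 겹치는가? 안 겹치면 넣기
--     not_important = []
--     candidate = []
--     for index in message_index:
--         is_spoiler = False
--         start = index[0]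
--         end = index[1]
--         for spoiler in spoiler_ranges:
--             if start <= spoiler[1] and spoiler[0] <= end:
--                 candidate.append(message[start:end+1])
--                 is_spoiler = True
--         if not is_spoiler:
--             not_important.append(message[start:end+1])
--
--     # 3. not_important에 없고 candidate에서 중복x
--     important = []
--     for string in candidate:
--         if string not in not_important:
--             if string not in important:
--                 important.append(string)
--     return len(important)
-- ===== SOURCE B (Python) =====
-- def solution(message, spoiler_ranges):
--     # One pass over the characters: accumulate the current word, classify it as
--     # spoiled/clean the moment it ends, and return the size of the set difference.
--     spoiled = set()
--     clean = set()
--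
--     def classify(word, start, end):
--         if any(start <= sp[1] and sp[0] <= end for sp in spoiler_ranges):
--             spoiled.add(word)
--         else:
--             clean.add(word)
--
--     word = []
--     start = 0
--     for i, ch in enumerate(message):
--         if ch == " ":
--             classify("".join(word), start, i - 1)
--             word = []
--             start = i + 1
--         else:
--             word.append(ch)
--     if message:
--         classify("".join(word), start, len(message) - 1)
--     return len(spoiled - clean)
-- ===== Notes on version B (the rewrite author's own statement) =====
-- stated objective: simpler
-- what changed: A's three phases (index-range list, a candidate list getting one copy of the word per matching spoiler, then a quadratic not-in/dedup loop) are replaced by a single character scan that accumulates each word, classifies it once with any() into a spoiled or clean set, and returns len(spoiled - clean).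
import Mathlib
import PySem

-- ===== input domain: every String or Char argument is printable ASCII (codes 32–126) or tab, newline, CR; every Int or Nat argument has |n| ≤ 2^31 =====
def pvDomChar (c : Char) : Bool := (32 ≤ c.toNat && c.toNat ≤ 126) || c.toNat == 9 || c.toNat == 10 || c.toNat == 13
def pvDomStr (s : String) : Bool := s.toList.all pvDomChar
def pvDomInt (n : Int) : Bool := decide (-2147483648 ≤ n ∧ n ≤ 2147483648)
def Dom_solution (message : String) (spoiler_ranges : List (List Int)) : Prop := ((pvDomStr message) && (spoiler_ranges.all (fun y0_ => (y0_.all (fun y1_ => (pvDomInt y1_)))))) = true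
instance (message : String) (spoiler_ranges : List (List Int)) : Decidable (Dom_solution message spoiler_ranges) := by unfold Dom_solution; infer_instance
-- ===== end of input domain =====

-- B replaces A's three passes (range list, candidate list with one copy per matching
-- spoiler, then a quadratic membership-dedup loop) by a single scan that accumulates each
-- word and classifies it at once into a spoiled/clean set, returning len(spoiled - clean).

-- ===== PORT A =====
-- step 1 loop body: index i over range(len(message)); message[i] is an in-range access,
-- ported as getD (always within bounds for i < len).
def stepA1 (chars : List Char) (st : List (Int × Int) × Int) (i : Nat) : List (Int × Int) × Int :=
  let st' := if chars.getD i ' ' = ' ' then (st.1 ++ [(st.2, (i : Int) - 1)], (i : Int) + 1) else st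
  if (i : Int) = (chars.length : Int) - 1 then (st'.1 ++ [(st'.2, (i : Int))], st'.2) else st'

-- inner loop of step 2 (state: candidate, is_spoiler); spoiler[1]/spoiler[0] via pyGetD
-- (total form; Pre_solution excludes the IndexError inputs)
def stepA2inner (chars : List Char) (start e : Int) (st2 : List (List Char) × Bool)
    (spoiler : List Int) : List (List Char) × Bool :=
  if start ≤ PySem.List.pyGetD spoiler 1 0 ∧ PySem.List.pyGetD spoiler 0 0 ≤ e then
    (st2.1 ++ [PySem.List.slice chars (some start) (some (e + 1))], true)
  else st2

-- outer loop of step 2 (state: not_important, candidate)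
def stepA2 (chars : List Char) (spoiler_ranges : List (List Int))
    (st : List (List Char) × List (List Char)) (idx : Int × Int) :
    List (List Char) × List (List Char) :=
  let inner := spoiler_ranges.foldl (stepA2inner chars idx.1 idx.2) (st.2, false)
  if inner.2 = true then (st.1, inner.1)
  else (st.1 ++ [PySem.List.slice chars (some idx.1) (some (idx.2 + 1))], inner.1)

-- step 3 loop body (state: important)
def stepA3 (not_important : List (List Char)) (imp : List (List Char)) (s : List Char) :
    List (List Char) :=
  if s ∉ not_important then (if s ∉ imp then imp ++ [s] else imp) else imp

def solution (message : String) (spoiler_ranges : List (List Int)) : Int :=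
  let chars := message.toList
  let st1 := (List.range chars.length).foldl (stepA1 chars) ([], 0)
  let st2 := st1.1.foldl (stepA2 chars spoiler_ranges) ([], [])
  let important := st2.2.foldl (stepA3 st2.1) []
  (important.length : Int)

-- ===== PORT B =====
-- any(start <= sp[1] and sp[0] <= end for sp in spoiler_ranges)
def overlapsAny (spoiler_ranges : List (List Int)) (start e : Int) : Bool :=
  spoiler_ranges.any (fun sp =>
    decide (start ≤ PySem.List.pyGetD sp 1 0) && decide (PySem.List.pyGetD sp 0 0 ≤ e))

-- B's classify helper: put the finished word into the spoiled or the clean set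
def classifyB (spoiler_ranges : List (List Int))
    (sets : PySem.Set (List Char) × PySem.Set (List Char))
    (word : List Char) (start e : Int) :
    PySem.Set (List Char) × PySem.Set (List Char) :=
  if overlapsAny spoiler_ranges start e then (PySem.Set.add sets.1 word, sets.2)
  else (sets.1, PySem.Set.add sets.2 word)

-- B's loop body over enumerate(message) (state: (spoiled, clean), word, start)
def stepB (spoiler_ranges : List (List Int))
    (st : (PySem.Set (List Char) × PySem.Set (List Char)) × List Char × Int)
    (p : Int × Char) : (PySem.Set (List Char) × PySem.Set (List Char)) × List Char × Int :=
  if p.2 = ' ' then (classifyB spoiler_ranges st.1 st.2.1 st.2.2 (p.1 - 1), ([] : List Char), p.1 + 1)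
  else (st.1, st.2.1 ++ [p.2], st.2.2)

def solution_alt (message : String) (spoiler_ranges : List (List Int)) : Int :=
  let chars := message.toList
  let st := (PySem.List.enumerate chars 0).foldl (stepB spoiler_ranges)
      ((PySem.Set.empty, PySem.Set.empty), ([] : List Char), 0)
  let sets := if chars.isEmpty then st.1
    else classifyB spoiler_ranges st.1 st.2.1 st.2.2 ((chars.length : Int) - 1)
  PySem.Set.len (PySem.Set.diff sets.1 sets.2)

-- ===== PRECONDITION & SPEC =====
-- Pre_ excludes exactly the inputs where Python A raises IndexError: a nonempty message
-- together with some spoiler entry of length < 2 (spoiler[1] / spoiler[0]).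
def Pre_solution (message : String) (spoiler_ranges : List (List Int)) : Prop :=
  message = "" ∨ ∀ sp ∈ spoiler_ranges, 2 ≤ sp.length
instance (message : String) (spoiler_ranges : List (List Int)) : Decidable (Pre_solution message spoiler_ranges) := by unfold Pre_solution; infer_instance
def pvWitness_solution : String × List (List Int) := ("this is a spoiler alert", [[10, 16], [0, 3]])
def Spec_solution (message : String) (spoiler_ranges : List (List Int)) (out : Int) : Prop := out = solution_alt message spoiler_ranges
instance (message : String) (spoiler_ranges : List (List Int)) (out : Int) : Decidable (Spec_solution message spoiler_ranges out) := by unfold Spec_solution; infer_instance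

-- ===== CLAIM (what is proved, stated in full; the proofs are below) =====
def Claim_equal_solution : Prop := ∀ (message : String) (spoiler_ranges : List (List Int)), Dom_solution message spoiler_ranges → Pre_solution message spoiler_ranges → Spec_solution message spoiler_ranges (solution message spoiler_ranges)

-- ===== LEMMAS AND PROOFS =====

-- canonical token lists: ranges only, and (word, start, end) triples
def rtoks : List Char → Nat → Int → List (Int × Int)
  | [], pos, ws => [(ws, (pos : Int) - 1)]
  | c :: rest, pos, ws =>
      if c = ' ' then (ws, (pos : Int) - 1) :: rtoks rest (pos + 1) ((pos : Int) + 1)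
      else rtoks rest (pos + 1) ws

def toks : List Char → Nat → List Char → Int → List (List Char × Int × Int)
  | [], pos, word, ws => [(word, ws, (pos : Int) - 1)]
  | c :: rest, pos, word, ws =>
      if c = ' ' then (word, ws, (pos : Int) - 1) :: toks rest (pos + 1) [] ((pos : Int) + 1)
      else toks rest (pos + 1) (word ++ [c]) ws

def condB (start e : Int) (sp : List Int) : Bool :=
  decide (start ≤ PySem.List.pyGetD sp 1 0) && decide (PySem.List.pyGetD sp 0 0 ≤ e)

def wordOf (chars : List Char) (r : Int × Int) : List Char :=
  PySem.List.slice chars (some r.1) (some (r.2 + 1))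

-- matched / unmatched word lists
def Mw (chars : List Char) (sr : List (List Int)) (rs : List (Int × Int)) : List (List Char) :=
  (rs.filter (fun r => overlapsAny sr r.1 r.2)).map (wordOf chars)
def Uw (chars : List Char) (sr : List (List Int)) (rs : List (Int × Int)) : List (List Char) :=
  (rs.filter (fun r => !overlapsAny sr r.1 r.2)).map (wordOf chars)

lemma getE_of_drop {chars cs : List Char} {c : Char} {k : Nat}
    (h : chars.drop k = c :: cs) : chars[k]? = some c := by
  have h0 : (chars.drop k)[0]? = some c := by rw [h]; rfl
  rw [List.getElem?_drop] at h0
  simpa using h0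

lemma getD_of_drop {chars cs : List Char} {c : Char} {k : Nat}
    (h : chars.drop k = c :: cs) : chars.getD k ' ' = c := by
  simp [List.getD_eq_getElem?_getD, getE_of_drop h]

lemma drop_succ_of_drop {chars cs : List Char} {c : Char} {k : Nat}
    (h : chars.drop k = c :: cs) : chars.drop (k + 1) = cs := by
  have : (chars.drop k).tail = cs := by rw [h]; rfl
  simpa [List.tail_drop] using this

lemma A1 (chars : List Char) : ∀ (cs : List Char) (k : Nat) (acc : List (Int × Int)) (ws : Int),
    chars.drop k = cs → k < chars.length →
    ((List.range' k (chars.length - k)).foldl (stepA1 chars) (acc, ws)).1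
      = acc ++ rtoks cs k ws := by
  intro cs
  induction cs with
  | nil => intro k acc ws hd hk; exact absurd (List.drop_eq_nil_iff.mp hd) (by omega)
  | cons c rest ih =>
    intro k acc ws hd hk
    have hlen : chars.length - k = rest.length + 1 := by
      have := congrArg List.length hd; simpa using this
    have hget : chars.getD k ' ' = c := getD_of_drop hd
    have hgetE : chars[k]?.getD ' ' = c := by simp [getE_of_drop hd]
    have hdrop' : chars.drop (k + 1) = rest := drop_succ_of_drop hd
    have hrange : chars.length - k = (chars.length - (k + 1)) + 1 := by omega
    rw [hrange, List.range'_succ, List.foldl_cons]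
    by_cases hrest : rest = []
    · subst hrest
      have hlen1 : chars.length - k = 1 := by simpa using hlen
      have hk1 : chars.length = k + 1 := by omega
      have hz : chars.length - (k + 1) = 0 := by omega
      rw [hz]
      have hlast : ((k : Int) = (chars.length : Int) - 1) := by omega
      by_cases hc : c = ' '
      · simp only [stepA1, List.range'_zero, List.foldl_nil, rtoks]
        simp [hget, hgetE, hc, hlast]
      · simp only [stepA1, List.range'_zero, List.foldl_nil, rtoks]
        simp [hget, hgetE, hc, hlast]
    · have hk1 : k + 1 < chars.length := by
        have : 0 < rest.length := List.length_pos_of_ne_nil hrest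
        omega
      have hnl : ¬ ((k : Int) = (chars.length : Int) - 1) := by omega
      by_cases hc : c = ' '
      · have hstep : stepA1 chars (acc, ws) k = (acc ++ [(ws, (k : Int) - 1)], (k : Int) + 1) := by
          simp [stepA1, hget, hgetE, hc, hnl]
        rw [hstep, ih (k + 1) _ _ hdrop' hk1]
        simp [rtoks, hc]
      · have hstep : stepA1 chars (acc, ws) k = (acc, ws) := by
          simp [stepA1, hget, hgetE, hc, hnl]
        rw [hstep, ih (k + 1) _ _ hdrop' hk1]
        simp [rtoks, hc]

-- toks with the slice invariant equals rtoks decorated with slices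
lemma toks_words (chars : List Char) : ∀ (cs : List Char) (k ws : Nat),
    chars.drop k = cs → ws ≤ k →
    toks cs k (PySem.List.slice chars (some (ws : Int)) (some (k : Int))) (ws : Int)
      = (rtoks cs k (ws : Int)).map (fun r => (wordOf chars r, r.1, r.2)) := by
  intro cs
  induction cs with
  | nil =>
    intro k ws hd hws
    simp only [toks, rtoks, List.map_cons, List.map_nil, wordOf]
    have h1 : ((k : Int) - 1 + 1) = (k : Int) := by ring
    rw [h1]
  | cons c rest ih =>
    intro k ws hd hws
    have hdrop' : chars.drop (k + 1) = rest := drop_succ_of_drop hd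
    by_cases hc : c = ' '
    · have hcast : ((k : Int) + 1) = ((k + 1 : Nat) : Int) := by push_cast; ring
      have hempty : PySem.List.slice chars (some ((k + 1 : Nat) : Int)) (some ((k + 1 : Nat) : Int)) = ([] : List Char) := by
        rw [PySem.List.slice_natCast]; simp
      have hih := ih (k + 1) (k + 1) hdrop' (le_refl _)
      rw [hempty] at hih
      simp only [toks, rtoks, List.map_cons]
      rw [if_pos hc, if_pos hc, hcast, hih, List.map_cons]
      simp only [wordOf]
      have h1 : ((k : Int) - 1 + 1) = (k : Int) := by ring
      rw [h1]
    · have hcell : chars[k]? = some c := getE_of_drop hd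
      have hext : PySem.List.slice chars (some (ws : Int)) (some (k : Int)) ++ [c]
          = PySem.List.slice chars (some (ws : Int)) (some ((k + 1 : Nat) : Int)) := by
        rw [PySem.List.slice_natCast, PySem.List.slice_natCast]
        have h1 : k + 1 - ws = (k - ws) + 1 := by omega
        rw [h1, List.take_succ]
        have h2 : (chars.drop ws)[k - ws]? = some c := by
          rw [List.getElem?_drop]
          have h3 : ws + (k - ws) = k := by omega
          rw [h3, hcell]
        rw [h2]
        rfl
      have hih := ih (k + 1) ws hdrop' (by omega)
      simp only [toks, rtoks]
      rw [if_neg hc, if_neg hc, hext, hih]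

lemma A2inner (chars : List Char) (start e : Int) :
    ∀ (sps : List (List Int)) (c : List (List Char)) (b : Bool),
    sps.foldl (stepA2inner chars start e) (c, b)
      = (c ++ List.replicate ((sps.filter (condB start e)).length)
            (PySem.List.slice chars (some start) (some (e + 1))),
         b || sps.any (condB start e)) := by
  intro sps
  induction sps with
  | nil => intro c b; simp
  | cons sp sps ih =>
    intro c b
    by_cases h : start ≤ PySem.List.pyGetD sp 1 0 ∧ PySem.List.pyGetD sp 0 0 ≤ e
    · have hcb : condB start e sp = true := by
        simp only [condB, Bool.and_eq_true, decide_eq_true_eq]; exact h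
      simp only [List.foldl_cons, stepA2inner, if_pos h]
      rw [ih]
      simp [hcb, List.replicate_succ, List.filter_cons]
    · have hcb : condB start e sp = false := by
        simp only [condB]
        rcases not_and_or.mp h with h1 | h1 <;> simp [h1]
      simp only [List.foldl_cons, stepA2inner, if_neg h]
      rw [ih]
      simp [hcb, List.filter_cons]

lemma ov_eq_any (sr : List (List Int)) (start e : Int) :
    overlapsAny sr start e = sr.any (condB start e) := rfl

lemma filter_nil_of_not_ov {sr : List (List Int)} {start e : Int}
    (h : ¬ overlapsAny sr start e = true) : sr.filter (condB start e) = [] := by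
  have hany : sr.any (condB start e) = false := by
    rw [← ov_eq_any]; simpa using h
  exact List.filter_eq_nil_iff.mpr (by
    intro a ha
    have := List.any_eq_false.mp hany a ha
    simpa using this)

lemma A2 (chars : List Char) (sr : List (List Int)) :
    ∀ (rs : List (Int × Int)) (ni cand : List (List Char)),
    rs.foldl (stepA2 chars sr) (ni, cand)
      = (ni ++ Uw chars sr rs,
         cand ++ rs.flatMap (fun r => List.replicate ((sr.filter (condB r.1 r.2)).length) (wordOf chars r))) := by
  intro rs
  induction rs with
  | nil => intro ni cand; simp [Uw]
  | cons r rs ih =>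
    intro ni cand
    simp only [List.foldl_cons, stepA2, A2inner chars r.1 r.2 sr cand false]
    by_cases hov : overlapsAny sr r.1 r.2 = true
    · have hany : sr.any (condB r.1 r.2) = true := by rw [← ov_eq_any]; exact hov
      simp only [hany, Bool.false_or, if_pos rfl]
      rw [ih]
      simp [Uw, hov, List.filter_cons, wordOf]
    · have hany : sr.any (condB r.1 r.2) = false := by
        rw [← ov_eq_any]; simpa using hov
      have hnil : sr.filter (condB r.1 r.2) = [] := filter_nil_of_not_ov hov
      simp only [hany, Bool.false_or, if_neg Bool.false_ne_true]
      rw [ih]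
      simp [Uw, hov, List.filter_cons, hnil, wordOf]

lemma A3 (ni : List (List Char)) :
    ∀ (l : List (List Char)) (imp : List (List Char)),
    l.foldl (stepA3 ni) imp
      = (l.filter (fun s => !decide (s ∈ ni))).foldl PySem.Set.add imp := by
  intro l
  induction l with
  | nil => intro imp; rfl
  | cons s l ih =>
    intro imp
    by_cases hni : s ∈ ni
    · simp only [List.foldl_cons, stepA3, List.filter_cons]
      rw [ih]
      simp [hni]
    · by_cases himp : s ∈ imp
      · simp only [List.foldl_cons, stepA3, List.filter_cons]
        rw [ih]
        simp [hni, himp, PySem.Set.add, List.contains_iff_mem]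
      · simp only [List.foldl_cons, stepA3, List.filter_cons]
        rw [ih]
        simp [hni, himp, PySem.Set.add, List.contains_iff_mem]

lemma set_add_idem (S : PySem.Set (List Char)) (w : List Char) :
    PySem.Set.add (PySem.Set.add S w) w = PySem.Set.add S w := by
  by_cases h : w ∈ S
  · simp [PySem.Set.add, List.contains_iff_mem, h]
  · simp [PySem.Set.add, List.contains_iff_mem, h]

lemma replicate_fold (w : List Char) :
    ∀ (k : Nat), 1 ≤ k → ∀ (S : PySem.Set (List Char)),
    (List.replicate k w).foldl PySem.Set.add S = PySem.Set.add S w := by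
  intro k
  induction k with
  | zero => omega
  | succ k ih =>
    intro _ S
    by_cases hk : 1 ≤ k
    · rw [List.replicate_succ, List.foldl_cons, ih hk, set_add_idem]
    · have : k = 0 := by omega
      subst this
      simp

lemma flat_fold (chars : List Char) (sr : List (List Int)) :
    ∀ (rs : List (Int × Int)) (S : PySem.Set (List Char)),
    (rs.flatMap (fun r => List.replicate ((sr.filter (condB r.1 r.2)).length) (wordOf chars r))).foldl
        PySem.Set.add S
      = (Mw chars sr rs).foldl PySem.Set.add S := by
  intro rs
  induction rs with
  | nil => intro S; rfl
  | cons r rs ih =>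
    intro S
    rw [List.flatMap_cons, List.foldl_append]
    by_cases hov : overlapsAny sr r.1 r.2 = true
    · have hany : sr.any (condB r.1 r.2) = true := by rw [← ov_eq_any]; exact hov
      have hpos : 1 ≤ (sr.filter (condB r.1 r.2)).length := by
        obtain ⟨a, ha, hca⟩ := List.any_eq_true.mp hany
        have hmem : a ∈ sr.filter (condB r.1 r.2) := List.mem_filter.mpr ⟨ha, hca⟩
        have := List.length_pos_of_mem hmem
        omega
      rw [replicate_fold _ _ hpos, ih]
      simp [Mw, List.filter_cons, hov]
    · have hnil : sr.filter (condB r.1 r.2) = [] := filter_nil_of_not_ov hov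
      rw [hnil]
      simp only [List.length_nil, List.replicate, List.foldl_nil]
      rw [ih]
      simp [Mw, List.filter_cons, hov]

lemma filter_fold (p : List Char → Bool) :
    ∀ (l : List (List Char)) (S : PySem.Set (List Char)),
    (l.filter p).foldl PySem.Set.add (S.filter p)
      = (l.foldl PySem.Set.add S).filter p := by
  intro l
  induction l with
  | nil => intro S; rfl
  | cons x l ih =>
    intro S
    by_cases hp : p x = true
    · have hadd : PySem.Set.add (S.filter p) x = (PySem.Set.add S x).filter p := by
        by_cases hc : x ∈ S
        · have h1 : (S.filter p).contains x = true := by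
            rw [List.contains_iff_mem]; exact List.mem_filter.mpr ⟨hc, hp⟩
          simp [PySem.Set.add, h1, List.contains_iff_mem, hc, hp]
        · have h1 : (S.filter p).contains x = false := by
            rw [Bool.eq_false_iff]
            intro h
            exact hc (List.mem_filter.mp (List.contains_iff_mem.mp h)).1
          simp [PySem.Set.add, h1, List.contains_iff_mem, hc, List.filter_append, hp]
      rw [List.filter_cons_of_pos hp, List.foldl_cons, List.foldl_cons, hadd, ih]
    · have hp' : p x = false := by simpa using hp
      have hadd : (PySem.Set.add S x).filter p = S.filter p := by
        by_cases hc : x ∈ S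
        · simp [PySem.Set.add, List.contains_iff_mem, hc]
        · simp [PySem.Set.add, List.contains_iff_mem, hc, List.filter_append, hp']
      rw [List.filter_cons_of_neg (by simp [hp']), List.foldl_cons, ← hadd, ih]

lemma B2 (sr : List (List Int)) :
    ∀ (ts : List (List Char × Int × Int)) (S C : PySem.Set (List Char)),
    ts.foldl (fun s t => classifyB sr s t.1 t.2.1 t.2.2) (S, C)
      = (((ts.filter (fun t => overlapsAny sr t.2.1 t.2.2)).map (·.1)).foldl PySem.Set.add S,
         ((ts.filter (fun t => !overlapsAny sr t.2.1 t.2.2)).map (·.1)).foldl PySem.Set.add C) := by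
  intro ts
  induction ts with
  | nil => intro S C; rfl
  | cons t ts ih =>
    intro S C
    rw [List.foldl_cons]
    by_cases hov : overlapsAny sr t.2.1 t.2.2 = true
    · have hstep : classifyB sr (S, C) t.1 t.2.1 t.2.2 = (PySem.Set.add S t.1, C) := by
        simp [classifyB, hov]
      rw [hstep, ih]
      simp [List.filter_cons, hov]
    · have hstep : classifyB sr (S, C) t.1 t.2.1 t.2.2 = (S, PySem.Set.add C t.1) := by
        simp [classifyB, hov]
      rw [hstep, ih]
      simp [List.filter_cons, hov]

lemma B1 (sr : List (List Int)) :
    ∀ (cs : List Char) (p : Nat) (ws : Int) (word : List Char) (S C : PySem.Set (List Char)),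
    (let r := (PySem.List.enumerate cs ((p : Nat) : Int)).foldl (stepB sr) ((S, C), word, ws);
      classifyB sr r.1 r.2.1 r.2.2 (((p : Nat) : Int) + (cs.length : Int) - 1))
      = (toks cs p word ws).foldl (fun s t => classifyB sr s t.1 t.2.1 t.2.2) (S, C) := by
  intro cs
  induction cs with
  | nil =>
    intro p ws word S C
    simp only [PySem.List.enumerate_nil, List.foldl_nil, toks, List.foldl_cons]
    have h0 : ((p : Int) + (([] : List Char).length : Int) - 1) = (p : Int) - 1 := by
      simp
    rw [h0]
  | cons c rest ih =>
    intro p ws word S C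
    rw [PySem.List.enumerate_cons]
    have harith1 : ((p : Int)) + 1 = (((p + 1 : Nat)) : Int) := by push_cast; ring
    have harith2 : ((p : Int)) + (((c :: rest) : List Char).length : Int) - 1
        = (((p + 1 : Nat)) : Int) + ((rest : List Char).length : Int) - 1 := by
      simp only [List.length_cons]; push_cast; ring
    simp only
    by_cases hc : c = ' '
    · rw [List.foldl_cons]
      have hstep : stepB sr ((S, C), word, ws) (((p : Nat) : Int), c)
          = (classifyB sr (S, C) word ws ((p : Int) - 1), [], (p : Int) + 1) := by
        simp [stepB, hc]
      rw [hstep]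
      simp only [toks]
      rw [if_pos hc, List.foldl_cons, harith2, harith1]
      cases hX : classifyB sr (S, C) word ws ((p : Int) - 1) with
      | mk S' C' =>
        have hih := ih (p + 1) (((p + 1 : Nat)) : Int) [] S' C'
        simp only at hih
        exact hih
    · rw [List.foldl_cons]
      have hstep : stepB sr ((S, C), word, ws) (((p : Nat) : Int), c)
          = ((S, C), word ++ [c], ws) := by
        simp [stepB, hc]
      rw [hstep]
      simp only [toks]
      rw [if_neg hc, harith2, harith1]
      have hih := ih (p + 1) ws (word ++ [c]) S C
      simp only at hih
      exact hih

-- ===== VERDICT (by name: the statement is the Claim_ definition above) =====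
theorem solution_spec : Claim_equal_solution := by
  intro message sr _ _
  unfold Spec_solution
  by_cases hempty : message.toList = []
  · simp [solution, solution_alt, hempty, PySem.Set.diff, PySem.Set.len, PySem.Set.empty]
  · have hn : 0 < message.toList.length := List.length_pos_of_ne_nil hempty
    have hne : message.toList.isEmpty = false := by simp [hempty]
    simp only [solution, solution_alt, hne, Bool.false_eq_true, if_false, List.range_eq_range']
    generalize message.toList = chars at hn hne hempty ⊢
    -- A side
    have hA1 : (List.foldl (stepA1 chars) ([], 0) (List.range' 0 chars.length)).1
        = rtoks chars 0 0 := by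
      have h := A1 chars chars 0 [] 0 (by simp) hn
      simpa using h
    rw [hA1, A2 chars sr (rtoks chars 0 0) [] []]
    simp only [List.nil_append]
    rw [A3]
    have hff := filter_fold (fun s => !decide (s ∈ Uw chars sr (rtoks chars 0 0)))
        ((rtoks chars 0 0).flatMap
          (fun r => List.replicate ((sr.filter (condB r.1 r.2)).length) (wordOf chars r))) []
    simp only [List.filter_nil] at hff
    rw [hff, flat_fold]
    -- B side
    have hB1 := B1 sr chars 0 0 [] PySem.Set.empty PySem.Set.empty
    simp only [Nat.cast_zero, zero_add] at hB1
    have htoks : toks chars 0 [] 0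
        = (rtoks chars 0 0).map (fun r => (wordOf chars r, r.1, r.2)) := by
      have hsl : PySem.List.slice chars (some ((0 : Nat) : Int)) (some ((0 : Nat) : Int)) = ([] : List Char) := by
        rw [PySem.List.slice_natCast]; simp
      have h := toks_words chars chars 0 0 (by simp) (le_refl _)
      rw [hsl] at h
      simpa using h
    rw [hB1, htoks, B2]
    simp only [List.filter_map, List.map_map, PySem.Set.diff, PySem.Set.len, PySem.Set.empty,
      Function.comp_def, Mw, Uw]
    congr 1
    congr 1
    apply List.filter_congr
    intro x _
    have hcontains : ∀ (U : List (List Char)),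
        (U.foldl PySem.Set.add []).contains x = decide (x ∈ U) := by
      intro U
      have hof : U.foldl PySem.Set.add [] = PySem.Set.ofList U := rfl
      rw [hof]
      by_cases hx : x ∈ U
      · simp [List.contains_iff_mem, (PySem.Set.mem_ofList _ _).mpr hx, hx]
      · have hnx : x ∉ PySem.Set.ofList U := fun h => hx ((PySem.Set.mem_ofList _ _).mp h)
        simp [hx, List.contains_iff_mem, hnx]
    rw [hcontains]
    rfl
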